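-- pv_equiv track=rewrite | github.com/Quique-E/aoc-2025 | two_part_two.py | check
-- ===== SOURCE A (Python) =====
-- def get_divisors(x):
--     for i in range(1, int(x / 2) + 1):
--         if x % i == 0:
--             yield i
--     yield x
--
-- def check(x):
--     val = str(x)
--     length = len(str(x))
--
--     divisors = get_divisors(length)
--
--     for divisor in divisors:
--         # avoiding the last case, where divisor equals length
--         if divisor == length:
--             return False
--
--         segments_count = int(length / divisor)
--         segments = list()
--
--         # divide x in segments_count segments
--         start_point = 0
--         for i in range(0, segments_count):
--             segments.append(val[start_point:(divisor + start_point)])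
--             start_point += divisor
--
--         # if all segments are the same we've met the invalid id condition
--         if len(set(segments)) == 1:
--             return True
--
--     return False
-- ===== SOURCE B (Python) =====
-- def check(x):
--     s = str(x)
--     return s in (s + s)[1:-1]
-- ===== Notes on version B (the rewrite author's own statement) =====
-- stated objective: idiomatic
-- what changed: Replaces the divisor enumeration with segment-list building and set-dedup by the standard string-doubling test: s is a nontrivial repetition iff s occurs in (s+s)[1:-1].
import Mathlib
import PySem

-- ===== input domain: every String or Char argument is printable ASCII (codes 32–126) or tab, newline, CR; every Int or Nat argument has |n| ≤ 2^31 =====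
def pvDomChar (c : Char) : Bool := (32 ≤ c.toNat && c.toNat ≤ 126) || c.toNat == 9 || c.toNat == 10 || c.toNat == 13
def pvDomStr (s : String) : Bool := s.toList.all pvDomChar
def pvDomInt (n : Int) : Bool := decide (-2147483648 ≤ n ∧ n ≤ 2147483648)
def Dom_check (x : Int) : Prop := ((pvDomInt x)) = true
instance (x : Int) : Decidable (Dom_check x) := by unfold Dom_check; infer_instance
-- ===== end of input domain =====

-- B replaces A's divisor enumeration with segment building and set-dedup by the standard
-- string-doubling repetition test  s in (s+s)[1:-1]  (idiomatic; same return value).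

-- ===== PORT A =====
-- the inner segment-building loop of A (state: segments list, start_point)
def checkSegments (val : List Char) (divisor segCount : Int) : List (List Char) :=
  ((PySem.List.pyRange 0 segCount).foldl
    (fun (st : List (List Char) × Int) _ =>
      (st.1 ++ [PySem.List.slice val (some st.2) (some (divisor + st.2))], st.2 + divisor))
    (([] : List (List Char)), (0 : Int))).1

-- the outer 'for divisor in divisors' loop of A
def checkLoop (val : List Char) (length : Int) : List Int → Bool
  | [] => false
  | divisor :: rest =>
    if divisor == length then false
    else
      let segments := checkSegments val divisor (PySem.Int.truncdiv length divisor)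
      if (PySem.Set.ofList segments).length == 1 then true
      else checkLoop val length rest

-- the generator get_divisors(length), consumed eagerly (the loop's early returns make this equivalent)
def checkDivisors (length : Int) : List Int :=
  (PySem.List.pyRange 1 (PySem.Int.truncdiv length 2 + 1)).filter
    (fun i => PySem.Int.mod length i == 0) ++ [length]

def check (x : Int) : Bool :=
  let val := PySem.Int.toChars x
  let length := PySem.Chars.len val
  checkLoop val length (checkDivisors length)

-- ===== PORT B =====
def check_alt (x : Int) : Bool :=
  let s := PySem.Int.toChars x
  PySem.Chars.isIn s (PySem.List.slice (s ++ s) (some 1) (some (-1)))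

-- ===== PRECONDITION & SPEC =====
def Spec_check (x : Int) (out : Bool) : Prop := out = check_alt x
instance (x : Int) (out : Bool) : Decidable (Spec_check x out) := by unfold Spec_check; infer_instance

-- ===== CLAIM (what is proved, stated in full; the proofs are below) =====
def Claim_equal_check : Prop := ∀ (x : Int), Dom_check x → Spec_check x (check x)

-- ===== LEMMAS AND PROOFS =====

-- cyclic period p: s is fixed by cyclic rotation by p (matches B: an occurrence of s inside (s+s)[1:-1])
def Cyc (s : List Char) (p : Nat) : Prop :=
  ∀ i < s.length, s.getD i ' ' = s.getD ((i + p) % s.length) ' '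

-- block period d: s is its first d characters repeated (matches A: all length-d segments equal)
def Blk (s : List Char) (d : Nat) : Prop :=
  ∀ i < s.length, s.getD i ' ' = s.getD (i % d) ' '


theorem cyc_len (s : List Char) : Cyc s s.length := by
  intro i hi
  rw [Nat.add_mod_right, Nat.mod_eq_of_lt hi]

theorem cyc_sub (s : List Char) {a b : Nat} (hab : a ≤ b) (ha : Cyc s a) (hb : Cyc s b) :
    Cyc s (b - a) := by
  intro i hi
  have hn : 0 < s.length := by omega
  have h1 := ha ((i + (b - a)) % s.length) (Nat.mod_lt _ hn)
  rw [Nat.mod_add_mod, Nat.add_assoc, Nat.sub_add_cancel hab] at h1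
  rw [h1, ← hb i hi]

theorem cyc_mod (s : List Char) {a b : Nat} (ha0 : 0 < a) (ha : Cyc s a) (hb : Cyc s b) :
    Cyc s (b % a) := by
  induction b using Nat.strong_induction_on with
  | _ b ih =>
    by_cases hba : b < a
    · rwa [Nat.mod_eq_of_lt hba]
    · have hab : a ≤ b := by omega
      rw [Nat.mod_eq_sub_mod hab]
      exact ih (b - a) (by omega) (cyc_sub s hab ha hb)

theorem cyc_gcd (s : List Char) {a b : Nat} (ha : Cyc s a) (hb : Cyc s b) :
    Cyc s (Nat.gcd a b) := by
  induction a using Nat.strong_induction_on generalizing b with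
  | _ a ih =>
    by_cases h0 : a = 0
    · subst h0; simpa [Nat.gcd_zero_left] using hb
    · have ha0 : 0 < a := Nat.pos_of_ne_zero h0
      rw [Nat.gcd_rec]
      exact ih (b % a) (Nat.mod_lt _ ha0) (cyc_mod s ha0 ha hb) ha

theorem blk_of_cyc_dvd (s : List Char) {g : Nat} (hg0 : 0 < g) (_hdvd : g ∣ s.length)
    (hc : Cyc s g) : Blk s g := by
  intro i hi
  induction i using Nat.strong_induction_on with
  | _ i ih =>
    by_cases hik : i < g
    · rw [Nat.mod_eq_of_lt hik]
    · have hgi : g ≤ i := by omega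
      have h1 := hc (i - g) (by omega)
      rw [Nat.sub_add_cancel hgi, Nat.mod_eq_of_lt hi] at h1
      have h2 := ih (i - g) (by omega) (by omega)
      have h3 : i % g = (i - g) % g := by
        conv_lhs => rw [← Nat.sub_add_cancel hgi, Nat.add_mod_right]
      rw [← h1, h2, h3]

theorem cyc_of_blk (s : List Char) {d : Nat} (_hd0 : 0 < d) (hdn : d < s.length)
    (hdvd : d ∣ s.length) (hb : Blk s d) : Cyc s d := by
  intro i hi
  obtain ⟨m, hm⟩ := hdvd
  by_cases h : i + d < s.length
  · rw [Nat.mod_eq_of_lt h, hb i hi, hb (i + d) h]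
    congr 1
    rw [Nat.add_mod_right]
  · have hmod : (i + d) % s.length = i + d - s.length := by
      rw [Nat.mod_eq_sub_mod (by omega), Nat.mod_eq_of_lt (by omega)]
    rw [hmod, hb i hi, hb (i + d - s.length) (by omega)]
    congr 1
    have e : (i + d - s.length) + d * m = i + d := by omega
    have h2 : (i + d - s.length) % d = i % d := by
      conv_lhs => rw [← Nat.add_mul_mod_self_left (i + d - s.length) d m, e, Nat.add_mod_right]
    exact h2.symm

theorem blk_iff_cyc (s : List Char) :
    (∃ d : Nat, 1 ≤ d ∧ d < s.length ∧ d ∣ s.length ∧ Blk s d) ↔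
    (∃ p : Nat, 1 ≤ p ∧ p < s.length ∧ Cyc s p) := by
  constructor
  · rintro ⟨d, hd1, hdn, hdvd, hb⟩
    exact ⟨d, hd1, hdn, cyc_of_blk s hd1 hdn hdvd hb⟩
  · rintro ⟨p, hp1, hpn, hc⟩
    refine ⟨Nat.gcd p s.length, Nat.gcd_pos_of_pos_left _ hp1, ?_, Nat.gcd_dvd_right _ _, ?_⟩
    · exact lt_of_le_of_lt (Nat.gcd_le_left _ hp1) hpn
    · exact blk_of_cyc_dvd s (Nat.gcd_pos_of_pos_left _ hp1) (Nat.gcd_dvd_right _ _)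
        (cyc_gcd s hc (cyc_len s))

theorem slice_mid (s : List Char) (h : 1 ≤ s.length) :
    PySem.List.slice (s++s) (some 1) (some (-1)) = ((s++s).drop 1).take (2*s.length-2) := by
  simp only [PySem.List.slice, PySem.List.clampIdx]
  have hm : min 1 (s.length + s.length) = 1 := by omega
  norm_num
  rw [if_neg (by omega), hm, List.drop_one]
  congr 1
  omega

-- (s++s)[q]? = s[q % n]? for q < 2n
theorem double_get (s : List Char) (q : Nat) (hq : q < 2 * s.length) :
    (s ++ s)[q]? = s[q % s.length]? := by
  by_cases h : q < s.length
  · rw [List.getElem?_append_left h, Nat.mod_eq_of_lt h]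
  · rw [List.getElem?_append_right (by omega)]
    congr 1
    rw [Nat.mod_eq_sub_mod (by omega), Nat.mod_eq_of_lt (by omega)]

theorem alt_iff (s : List Char) (h : 1 ≤ s.length) :
    PySem.Chars.isIn s (PySem.List.slice (s++s) (some 1) (some (-1))) = true ↔
    ∃ p : Nat, 1 ≤ p ∧ p < s.length ∧ Cyc s p := by
  rw [slice_mid s h, PySem.Chars.isIn_iff_infix]
  set n := s.length with hn
  set t := ((s++s).drop 1).take (2*n-2) with ht
  have htlen : t.length = 2*n - 2 := by
    simp [ht, List.length_append]; omega
  have tget : ∀ m : Nat, m < 2*n-2 → t[m]? = s[(1 + m) % n]? := by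
    intro m hm
    rw [ht, List.getElem?_take, if_pos hm, List.getElem?_drop, double_get s (1+m) (by omega)]
  constructor
  · rintro ⟨u, v, huv⟩
    have hjlen : u.length + n + v.length = t.length := by
      rw [← huv]; simp [List.length_append]; omega
    set j := u.length with hj
    refine ⟨j + 1, by omega, by omega, ?_⟩
    intro i hi
    have h1 : t[j + i]? = s[i]? := by
      rw [← huv, List.append_assoc, List.getElem?_append_right (l₁ := u) (by omega)]
      have : j + i - u.length = i := by omega
      rw [this, List.getElem?_append_left hi]
    have h2 : t[j + i]? = s[(1 + (j + i)) % n]? := tget (j + i) (by omega)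
    rw [List.getD_eq_getElem?_getD, List.getD_eq_getElem?_getD, ← h1, h2]
    have he : 1 + (j + i) = i + (j + 1) := by omega
    rw [he]
  · rintro ⟨p, hp1, hpn, hc⟩
    have hs : s = (t.drop (p - 1)).take n := by
      apply List.ext_getElem?
      intro k
      by_cases hk : k < n
      · rw [List.getElem?_take, if_pos hk, List.getElem?_drop]
        have := tget (p - 1 + k) (by omega)
        rw [this]
        have hmod : (1 + (p - 1 + k)) % n = (k + p) % n := by congr 1; omega
        rw [hmod]
        have := hc k hk
        rw [List.getD_eq_getElem?_getD, List.getD_eq_getElem?_getD] at this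
        -- this : s[k]?.getD ' ' = s[(k+p)%n]?.getD ' '
        have hkl : k < s.length := hk
        have hml : (k + p) % n < s.length := Nat.mod_lt _ (by omega)
        rw [List.getElem?_eq_getElem hkl, List.getElem?_eq_getElem hml]
        rw [List.getElem?_eq_getElem hkl, List.getElem?_eq_getElem hml] at this
        simpa using this
      · rw [List.getElem?_take, if_neg hk, List.getElem?_eq_none (by omega)]
    rw [hs]
    exact ((List.take_prefix _ _).isInfix).trans ((List.drop_suffix _ _).isInfix)

theorem truncdiv_natCast (a b : Nat) : PySem.Int.truncdiv (a : Int) (b : Int) = ((a / b : Nat) : Int) := rfl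

-- the segment-building foldl, fully unrolled
theorem segs_foldl (s : List Char) (dv : Int) (m : Nat) (acc : List (List Char)) (st : Int) :
    (PySem.List.pyRange 0 (m : Int)).foldl
      (fun (p : List (List Char) × Int) _ =>
        (p.1 ++ [PySem.List.slice s (some p.2) (some (dv + p.2))], p.2 + dv))
      (acc, st) =
    (acc ++ (List.range m).map (fun (k : Nat) => PySem.List.slice s (some (st + (k : Int) * dv)) (some (st + (k : Int) * dv + dv))),
     st + m * dv) := by
  induction m generalizing acc st with
  | zero => simp [PySem.List.pyRange]
  | succ m ih =>
    rw [show ((m + 1 : Nat) : Int) = (m : Int) + 1 by push_cast; ring,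
        PySem.List.pyRange_one_succ_right (by positivity), List.foldl_append, ih]
    simp only [List.foldl_cons, List.foldl_nil, List.range_succ, List.map_append, List.map_cons,
      List.map_nil, List.append_assoc]
    refine Prod.ext ?_ ?_
    · simp only
      have harg : dv + (st + (m : Int) * dv) = st + (m : Int) * dv + dv := by ring
      rw [harg]
    · simp only
      ring

theorem checkSegments_eq (s : List Char) (d m : Nat) :
    checkSegments s (d : Int) (m : Int) =
      (List.range m).map (fun (k : Nat) => (s.drop (k * d)).take d) := by
  unfold checkSegments
  rw [segs_foldl]
  simp only [List.nil_append]
  apply List.map_congr_left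
  intro k hk
  have h1 : ((0 : Int) + k * d) = ((k * d : Nat) : Int) := by push_cast; ring
  rw [h1]
  have h2 : ((k * d : Nat) : Int) + (d : Int) = ((k * d + d : Nat) : Int) := by push_cast; ring
  rw [h2, PySem.List.slice_natCast]
  congr 1
  omega

theorem ofList_const {α : Type} [BEq α] [LawfulBEq α] (a : α) (l : List α)
    (h : ∀ x ∈ l, x = a) :
    List.foldl PySem.Set.add [a] l = [a] := by
  induction l with
  | nil => rfl
  | cons b t ih =>
    have hb : b = a := h b (by simp)
    subst hb
    have : PySem.Set.add [b] b = [b] := by simp [PySem.Set.add, PySem.Set.contains]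
    rw [List.foldl_cons, this]
    exact ih (fun x hx => h x (by simp [hx]))

theorem setLen_one_iff {α : Type} [BEq α] [LawfulBEq α] (l : List α) :
    (PySem.Set.ofList l).length = 1 ↔ l ≠ [] ∧ ∀ x ∈ l, ∀ y ∈ l, x = y := by
  constructor
  · intro h
    obtain ⟨c, hc⟩ : ∃ c, PySem.Set.ofList l = [c] := by
      match hs : PySem.Set.ofList l with
      | [c] => exact ⟨c, rfl⟩
      | [] => rw [hs] at h; simp at h
      | _ :: _ :: _ => rw [hs] at h; simp at h
    constructor
    · rintro rfl
      simp [PySem.Set.ofList, PySem.Set.empty] at hc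
    · intro x hx y hy
      have hx' : x ∈ PySem.Set.ofList l := (PySem.Set.mem_ofList l x).mpr hx
      have hy' : y ∈ PySem.Set.ofList l := (PySem.Set.mem_ofList l y).mpr hy
      rw [hc] at hx' hy'
      simp at hx' hy'
      rw [hx', hy']
  · rintro ⟨hne, hall⟩
    obtain ⟨a, t, rfl⟩ := List.exists_cons_of_ne_nil hne
    have h1 : PySem.Set.ofList (a :: t) = List.foldl PySem.Set.add [a] t := by
      simp [PySem.Set.ofList, PySem.Set.empty, PySem.Set.add, PySem.Set.contains]
    rw [h1, ofList_const a t (fun x hx => hall x (by simp [hx]) a (by simp))]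
    rfl

theorem blk_get (s : List Char) {d : Nat} (hb : Blk s d) {i : Nat} (hi : i < s.length) :
    s[i]? = s[i % d]? := by
  have h2 : i % d < s.length := lt_of_le_of_lt (Nat.mod_le _ _) hi
  have := hb i hi
  rw [List.getD_eq_getElem?_getD, List.getD_eq_getElem?_getD,
      List.getElem?_eq_getElem hi, List.getElem?_eq_getElem h2] at this
  rw [List.getElem?_eq_getElem hi, List.getElem?_eq_getElem h2]
  simpa using this

theorem allSegs_iff_blk (s : List Char) (d m : Nat) (hd : 0 < d) (hm0 : 0 < m)
    (hm : s.length = d * m) :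
    (∀ x ∈ (List.range m).map (fun (k : Nat) => (s.drop (k * d)).take d),
     ∀ y ∈ (List.range m).map (fun (k : Nat) => (s.drop (k * d)).take d), x = y) ↔ Blk s d := by
  have seg_get : ∀ (k r : Nat), k < m → ((s.drop (k * d)).take d)[r]? =
      if r < d then s[k * d + r]? else none := by
    intro k r hk
    rw [List.getElem?_take]
    by_cases hr : r < d
    · rw [if_pos hr, if_pos hr, List.getElem?_drop]
    · rw [if_neg hr, if_neg hr]
  constructor
  · intro hall i hi
    have hk : i / d < m := Nat.div_lt_of_lt_mul (by omega)
    have heq : (s.drop ((i / d) * d)).take d = (s.drop (0 * d)).take d := by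
      apply hall <;> simp only [List.mem_map]
      · exact ⟨i / d, by simp [List.mem_range, hk]⟩
      · exact ⟨0, by simp [List.mem_range]; omega⟩
    have h1 := congrArg (fun l => l[i % d]?) heq
    simp only at h1
    rw [seg_get _ _ hk, seg_get _ _ (by omega), if_pos (Nat.mod_lt _ hd),
        if_pos (Nat.mod_lt _ hd), Nat.div_add_mod', Nat.zero_mul, Nat.zero_add] at h1
    have h2 : i % d < s.length := lt_of_le_of_lt (Nat.mod_le _ _) hi
    rw [List.getD_eq_getElem?_getD, List.getD_eq_getElem?_getD, h1]
  · intro hb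
    have hseg : ∀ k < m, (s.drop (k * d)).take d = (s.drop (0 * d)).take d := by
      intro k hk
      apply List.ext_getElem?
      intro r
      rw [seg_get _ _ hk, seg_get _ _ hm0]
      by_cases hr : r < d
      · rw [if_pos hr, if_pos hr, Nat.zero_mul, Nat.zero_add]
        have hlt : k * d + r < s.length := by
          have : (k + 1) * d ≤ d * m := by
            have := Nat.succ_le_of_lt hk
            calc (k+1) * d ≤ m * d := Nat.mul_le_mul_right d this
            _ = d * m := Nat.mul_comm m d
          have hexp : (k+1) * d = k * d + d := by ring
          omega
        rw [blk_get s hb hlt]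
        congr 1
        have : (k * d + r) % d = r % d := by rw [Nat.mul_comm, Nat.add_comm, Nat.add_mul_mod_self_left]
        rw [this, Nat.mod_eq_of_lt hr]
      · rw [if_neg hr, if_neg hr]
    intro x hx y hy
    simp only [List.mem_map, List.mem_range] at hx hy
    obtain ⟨k1, hk1, rfl⟩ := hx
    obtain ⟨k2, hk2, rfl⟩ := hy
    rw [hseg k1 hk1, hseg k2 hk2]

theorem checkLoop_eq (s : List Char) (n : Int) (L : List Int) (hL : ∀ e ∈ L, e ≠ n) :
    checkLoop s n (L ++ [n]) =
      L.any (fun d => (PySem.Set.ofList (checkSegments s d (PySem.Int.truncdiv n d))).length == 1) := by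
  induction L with
  | nil => simp [checkLoop]
  | cons d rest ih =>
    have hdn : (d == n) = false := by
      simp only [beq_eq_false_iff_ne]; exact hL d (by simp)
    rw [List.cons_append, checkLoop, hdn]
    simp only [Bool.false_eq_true, if_false, List.any_cons]
    by_cases hp : ((PySem.Set.ofList (checkSegments s d (PySem.Int.truncdiv n d))).length == 1) = true
    · rw [if_pos hp, hp, Bool.true_or]
    · rw [if_neg hp, Bool.eq_false_iff.mpr hp, Bool.false_or]
      exact ih (fun e he => hL e (by simp [he]))

theorem pred_iff (s : List Char) (d : Nat) (hd : 0 < d) (hdvd : d ∣ s.length) (hdn : d < s.length) :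
    ((PySem.Set.ofList (checkSegments s (d : Int) (PySem.Int.truncdiv (s.length : Int) (d : Int)))).length == 1) = true
      ↔ Blk s d := by
  obtain ⟨m, hm⟩ := hdvd
  have hm0 : 0 < m := by
    rcases Nat.eq_zero_or_pos m with h | h
    · subst h; rw [Nat.mul_zero] at hm; omega
    · exact h
  have hdivm : s.length / d = m := by rw [hm, Nat.mul_div_cancel_left _ hd]
  rw [truncdiv_natCast, hdivm, checkSegments_eq, beq_iff_eq, setLen_one_iff]
  have hne : (List.range m).map (fun (k : Nat) => (s.drop (k * d)).take d) ≠ [] := by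
    simp [List.map_eq_nil_iff, List.range_eq_nil]
    omega
  rw [← allSegs_iff_blk s d m hd hm0 hm]
  tauto

theorem check_char' (s : List Char) (hs : 1 ≤ s.length) :
    checkLoop s (PySem.Chars.len s) (checkDivisors (PySem.Chars.len s)) = true ↔
      ∃ d : Nat, 1 ≤ d ∧ d < s.length ∧ d ∣ s.length ∧ Blk s d := by
  set n := s.length with hn
  have hlen : PySem.Chars.len s = (n : Int) := by rw [PySem.Chars.len_eq]
  rw [hlen]
  unfold checkDivisors
  have ht2 : PySem.Int.truncdiv (n : Int) 2 = ((n / 2 : Nat) : Int) := by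
    rw [show (2 : Int) = ((2 : Nat) : Int) from rfl, truncdiv_natCast]
  rw [ht2]
  have hmem : ∀ e ∈ (PySem.List.pyRange 1 ((n / 2 : Nat) + 1)).filter
      (fun i => PySem.Int.mod (n : Int) i == 0), e ≠ (n : Int) := by
    intro e he
    rw [List.mem_filter] at he
    have h1 := PySem.List.mem_pyRange_one.mp he.1
    have h2 : (n / 2 : Nat) * 2 ≤ n := Nat.div_mul_le_self n 2
    intro hcon
    subst hcon
    omega
  rw [checkLoop_eq s _ _ hmem, List.any_eq_true]
  constructor
  · rintro ⟨e, he, hpred⟩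
    rw [List.mem_filter] at he
    have h1 := PySem.List.mem_pyRange_one.mp he.1
    have hdvd : e ∣ (n : Int) := (PySem.Int.mod_eq_zero_iff_dvd _ _).mp (beq_iff_eq.mp he.2)
    set d := e.toNat with hdd
    have hed : e = (d : Int) := by omega
    have hdvd' : d ∣ n := by
      rw [hed] at hdvd
      exact_mod_cast hdvd
    have h2 : (n / 2 : Nat) * 2 ≤ n := Nat.div_mul_le_self n 2
    have hdn : d < n := by omega
    refine ⟨d, by omega, hdn, hdvd', ?_⟩
    rw [hed] at hpred
    exact (pred_iff s d (by omega) hdvd' hdn).mp hpred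
  · rintro ⟨d, hd1, hdn, hdvd, hb⟩
    refine ⟨(d : Int), ?_, (pred_iff s d (by omega) hdvd hdn).mpr hb⟩
    rw [List.mem_filter]
    constructor
    · rw [PySem.List.mem_pyRange_one]
      obtain ⟨k, hk⟩ := hdvd
      have hk2 : 2 ≤ k := by
        rcases Nat.lt_or_ge k 2 with h | h
        · interval_cases k <;> omega
        · exact h
      have : d ≤ n / 2 := by
        apply Nat.le_div_iff_mul_le (by omega) |>.mpr
        calc d * 2 ≤ d * k := Nat.mul_le_mul_left d hk2
        _ = n := hk.symm
      omega
    · rw [beq_iff_eq, PySem.Int.mod_eq_zero_iff_dvd]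
      exact_mod_cast hdvd

theorem toDigitsCore_ne_nil (b : Nat) : ∀ (fuel n : Nat) (ds : List Char), ds ≠ [] →
    Nat.toDigitsCore b fuel n ds ≠ [] := by
  intro fuel
  induction fuel with
  | zero => intro n ds h; simpa [Nat.toDigitsCore] using h
  | succ f ih =>
    intro n ds h
    simp only [Nat.toDigitsCore]
    split
    · simp
    · exact ih _ _ (by simp)

-- str(x) is never empty
theorem toChars_len_pos (x : Int) : 1 ≤ (PySem.Int.toChars x).length := by
  unfold PySem.Int.toChars
  split
  · simp
  · refine List.length_pos_of_ne_nil ?_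
    unfold Nat.toDigits
    simp only [Nat.toDigitsCore]
    split
    · simp
    · exact toDigitsCore_ne_nil 10 _ _ _ (by simp)

-- ===== VERDICT (by name: the statement is the Claim_ definition above) =====
theorem check_spec : Claim_equal_check := by
  intro x _
  have h1 : 1 ≤ (PySem.Int.toChars x).length := toChars_len_pos x
  show check x = check_alt x
  rw [Bool.eq_iff_iff]
  exact (check_char' _ h1).trans ((blk_iff_cyc _).trans (alt_iff _ h1).symm)
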